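-- pv_equiv track=rewrite | github.com/scoutwer/mock_test_2 | p10.py | f
-- ===== SOURCE A (Python) =====
-- def f(arr):
--     dic = {"value": arr[0][0],
--            "row":0,
--            "column": 0
--            }
--     for i in range(len(arr)):
--         for x in range(len(arr[i])):
--             if arr[i][x] < dic["value"]:
--                 dic["value"] = arr[i][x]
--                 dic["row"] = i
--                 dic["column"] = x
--     if dic["row"] == dic["column"]:
--         return True
--     else:
--         return False
-- ===== SOURCE B (Python) =====
-- def f(arr):
--     m = min(v for row in arr for v in row)
--     i = 0
--     for row in arr:
--         j = 0
--         for v in row: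
--             if v == m:
--                 return i == j
--             j += 1
--         i += 1
-- ===== Notes on version B (the rewrite author's own statement) =====
-- stated objective: alternative
-- what changed: Replaces A's single pass that threads a value/row/column record through strict-improvement updates by a two-phase decomposition: first compute the global minimum with builtin min over a flattened generator, then locate its first row-major occurrence by equality and compare the indices.
import Mathlib
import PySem

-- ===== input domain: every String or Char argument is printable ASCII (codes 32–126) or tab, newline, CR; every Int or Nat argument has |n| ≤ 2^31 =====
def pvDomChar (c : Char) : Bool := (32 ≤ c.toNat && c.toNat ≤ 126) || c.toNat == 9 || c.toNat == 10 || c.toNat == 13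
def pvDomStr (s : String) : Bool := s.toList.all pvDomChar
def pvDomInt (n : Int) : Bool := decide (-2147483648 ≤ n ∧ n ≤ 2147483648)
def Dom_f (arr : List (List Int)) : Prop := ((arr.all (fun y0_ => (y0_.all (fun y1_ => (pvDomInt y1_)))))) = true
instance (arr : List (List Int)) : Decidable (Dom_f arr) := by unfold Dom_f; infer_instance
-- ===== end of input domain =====

-- B replaces A's single pass threading a value/row/column record by two phases (global min, then
-- first row-major occurrence); same cost, different decomposition.

-- ===== PORT A =====
-- inner loop: for x in range(len(arr[i])): strict-improvement update of (value,row,column);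
-- hand recursion is exact since iterating arr[i] with a running index equals indexing by range(len).
def fInner (i : Nat) : List Int → Nat → (Int × Nat × Nat) → (Int × Nat × Nat)
  | [], _, st => st
  | v :: vs, x, st => fInner i vs (x + 1) (if v < st.1 then (v, i, x) else st)

-- outer loop: for i in range(len(arr))
def fOuter : List (List Int) → Nat → (Int × Nat × Nat) → (Int × Nat × Nat)
  | [], _, st => st
  | row :: rest, i, st => fOuter rest (i + 1) (fInner i row 0 st)

def f (arr : List (List Int)) : Bool :=
  match arr with
  | [] => false                 -- arr[0] raises IndexError: outside Pre_f
  | r0 :: _ =>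
    match r0 with
    | [] => false               -- arr[0][0] raises IndexError: outside Pre_f
    | v0 :: _ =>
      let st := fOuter arr 0 (v0, 0, 0)
      decide (st.2.1 = st.2.2)

-- ===== PORT B =====
-- inner loop of phase 2: first j with row[j] == m
def fAltRow (m : Int) : List Int → Nat → Option Nat
  | [], _ => none
  | v :: vs, j => if v = m then some j else fAltRow m vs (j + 1)

-- outer loop of phase 2: first row-major occurrence of m, returning i == j there
def fAltSearch (m : Int) : List (List Int) → Nat → Bool
  | [], _ => false              -- unreachable: m occurs in arr
  | row :: rest, i =>
    match fAltRow m row 0 with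
    | some j => decide (i = j)
    | none => fAltSearch m rest (i + 1)

def f_alt (arr : List (List Int)) : Bool :=
  match PySem.List.min? (arr.flatMap (fun r => r)) (fun v => v) with
  | none => false               -- min() of empty generator raises ValueError: outside Pre_f
  | some m => fAltSearch m arr 0

-- ===== PRECONDITION & SPEC =====
-- Pre_f: A evaluates arr[0][0] first, so it raises IndexError iff arr is empty or its first row is.
def Pre_f (arr : List (List Int)) : Prop := arr ≠ [] ∧ arr.headD [] ≠ []
instance (arr : List (List Int)) : Decidable (Pre_f arr) := by unfold Pre_f; infer_instance

def pvWitness_f : List (List Int) := [[3, 1], [0, 2]]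

def Spec_f (arr : List (List Int)) (out : Bool) : Prop := out = f_alt arr
instance (arr : List (List Int)) (out : Bool) : Decidable (Spec_f arr out) := by unfold Spec_f; infer_instance

-- ===== CLAIM (what is proved, stated in full; the proofs are below) =====
def Claim_equal_f : Prop := ∀ (arr : List (List Int)), Dom_f arr → Pre_f arr → Spec_f arr (f arr)

-- ===== LEMMAS AND PROOFS =====

-- foldl-min toolbox
theorem fmin_le_init (l : List Int) (a : Int) : l.foldl min a ≤ a := by
  induction l generalizing a with
  | nil => simp
  | cons v vs ih => exact le_trans (ih (min a v)) (min_le_left _ _)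

theorem fmin_le_mem (l : List Int) (a : Int) {x : Int} (hx : x ∈ l) : l.foldl min a ≤ x := by
  induction l generalizing a with
  | nil => simp at hx
  | cons v vs ih =>
    rcases List.mem_cons.mp hx with rfl | hx
    · exact le_trans (fmin_le_init vs (min a x)) (min_le_right _ _)
    · exact ih (min a v) hx

-- the outer fold of minima equals the fold over the flattened list
def mval (rows : List (List Int)) (a : Int) : Int :=
  rows.foldl (fun acc row => row.foldl min acc) a

theorem mval_eq_flat (rows : List (List Int)) (a : Int) :
    mval rows a = (rows.flatMap (fun r => r)).foldl min a := by
  induction rows generalizing a with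
  | nil => rfl
  | cons row rest ih => simp [mval, List.foldl_append] at *; rw [ih]

-- A's inner loop: value is the fold of min
theorem fInner_val (i : Nat) (row : List Int) (x : Nat) (st : Int × Nat × Nat) :
    (fInner i row x st).1 = row.foldl min st.1 := by
  induction row generalizing x st with
  | nil => rfl
  | cons v vs ih =>
    simp only [fInner, List.foldl]
    rw [ih]
    congr 1
    split <;> simp <;> omega

-- A's inner loop: no strict improvement → state unchanged
theorem fInner_noupd (i : Nat) (row : List Int) (x : Nat) (st : Int × Nat × Nat)
    (h : ∀ v ∈ row, st.1 ≤ v) : fInner i row x st = st := by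
  induction row generalizing x with
  | nil => rfl
  | cons v vs ih =>
    simp only [fInner]
    rw [if_neg (by have := h v (by simp); omega)]
    exact ih (x + 1) (fun w hw => h w (List.mem_cons_of_mem _ hw))

-- A's inner loop with a strict improvement lands on the first occurrence of the row minimum
theorem fInner_upd (i : Nat) (row : List Int) (x : Nat) (st : Int × Nat × Nat) (m : Int)
    (hm : m = row.foldl min st.1) (hlt : m < st.1) :
    ∃ j, fAltRow m row x = some j ∧ fInner i row x st = (m, i, j) := by
  induction row generalizing x st with
  | nil => simp [List.foldl] at hm; omega
  | cons v vs ih =>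
    by_cases hv : v = m
    · subst hv
      refine ⟨x, by simp [fAltRow], ?_⟩
      simp only [fInner]
      rw [if_pos hlt]
      exact fInner_noupd i vs (x + 1) (v, i, x)
        (fun w hw => by
          have := fmin_le_mem vs (min st.1 v) hw
          simp only [List.foldl] at hm
          simp; omega)
    · have hle : m ≤ min st.1 v := by
        simp only [List.foldl] at hm
        exact hm ▸ fmin_le_init vs (min st.1 v)
      have hmv : m < v := lt_of_le_of_ne (le_trans hle (min_le_right _ _)) (fun h => hv h.symm)
      simp only [fInner]
      have hst' : (if v < st.1 then ((v : Int), i, x) else st).1 = min st.1 v := by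
        split <;> simp <;> omega
      obtain ⟨j, hj, hres⟩ := ih (x + 1) (if v < st.1 then (v, i, x) else st)
        (by rw [hst']; simpa [List.foldl] using hm) (by rw [hst']; omega)
      exact ⟨j, by simp [fAltRow, hv, hj], hres⟩

-- no occurrence → fAltRow finds nothing
theorem fAltRow_none (m : Int) (row : List Int) (x : Nat) (h : ∀ v ∈ row, v ≠ m) :
    fAltRow m row x = none := by
  induction row generalizing x with
  | nil => rfl
  | cons v vs ih =>
    simp only [fAltRow]
    rw [if_neg (h v (by simp))]
    exact ih (x + 1) (fun w hw => h w (List.mem_cons_of_mem _ hw))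

-- A's outer loop: no strict improvement anywhere → state unchanged
theorem fOuter_noupd (rows : List (List Int)) (i : Nat) (st : Int × Nat × Nat)
    (h : ∀ row ∈ rows, ∀ v ∈ row, st.1 ≤ v) : fOuter rows i st = st := by
  induction rows generalizing i with
  | nil => rfl
  | cons row rest ih =>
    simp only [fOuter]
    rw [fInner_noupd i row 0 st (h row (by simp))]
    exact ih (i + 1) (fun r hr v hv => h r (List.mem_cons_of_mem _ hr) v hv)

-- A's outer loop with a strict improvement agrees with B's search for the global minimum
theorem fOuter_upd (rows : List (List Int)) (i : Nat) (st : Int × Nat × Nat) (m : Int)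
    (hm : m = mval rows st.1) (hlt : m < st.1) :
    ∃ r j, fOuter rows i st = (m, r, j) ∧ fAltSearch m rows i = decide (r = j) := by
  induction rows generalizing i st with
  | nil => simp [mval] at hm; omega
  | cons row rest ih =>
    have hm' : m = mval rest (row.foldl min st.1) := by simpa [mval] using hm
    have hle : m ≤ row.foldl min st.1 :=
      hm' ▸ ((mval_eq_flat rest _) ▸ fmin_le_init _ _)
    by_cases hcase : m = row.foldl min st.1
    · -- minimum attained in this row
      obtain ⟨j, hj, hres⟩ := fInner_upd i row 0 st m hcase hlt
      refine ⟨i, j, ?_, by simp [fAltSearch, hj]⟩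
      simp only [fOuter, hres]
      refine fOuter_noupd rest (i + 1) (m, i, j) (fun r hr v hv => ?_)
      have : mval rest (row.foldl min st.1) ≤ v := by
        rw [mval_eq_flat]
        exact fmin_le_mem _ _ (by exact List.mem_flatMap.mpr ⟨r, hr, hv⟩)
      simp; omega
    · -- minimum is further on
      have hlt' : m < row.foldl min st.1 := lt_of_le_of_ne hle hcase
      have hrowne : ∀ v ∈ row, v ≠ m := fun v hv he => by
        have := fmin_le_mem row st.1 hv; omega
      have hst' : (fInner i row 0 st).1 = row.foldl min st.1 := fInner_val i row 0 st
      obtain ⟨r, j, hres, hsearch⟩ := ih (i + 1) (fInner i row 0 st) (by rw [hst']; exact hm')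
        (by rw [hst']; exact hlt')
      exact ⟨r, j, by simp [fOuter, hres], by simp [fAltSearch, fAltRow_none m row 0 hrowne, hsearch]⟩

-- ===== VERDICT (by name: the statement is the Claim_ definition above) =====
theorem f_spec : Claim_equal_f := by
  intro arr _ hpre
  obtain ⟨hne, hrow⟩ := hpre
  match arr with
  | [] => exact absurd rfl hne
  | [] :: rest => simp at hrow
  | (v0 :: r0) :: rest =>
    unfold Spec_f
    have hf : f ((v0 :: r0) :: rest)
        = decide ((fOuter ((v0 :: r0) :: rest) 0 (v0, 0, 0)).2.1
            = (fOuter ((v0 :: r0) :: rest) 0 (v0, 0, 0)).2.2) := rfl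
    have hflat : ((v0 :: r0) :: rest).flatMap (fun r => r)
        = v0 :: (r0 ++ rest.flatMap (fun r => r)) := by simp
    have hmin : PySem.List.min? (((v0 :: r0) :: rest).flatMap (fun r => r)) (fun v => v)
        = some ((r0 ++ rest.flatMap (fun r => r)).foldl min v0) := by
      rw [hflat]; exact PySem.List.min?_id_cons _ _
    have hfa : f_alt ((v0 :: r0) :: rest)
        = fAltSearch ((r0 ++ rest.flatMap (fun r => r)).foldl min v0) ((v0 :: r0) :: rest) 0 := by
      unfold f_alt; rw [hmin]
    have hmval : (r0 ++ rest.flatMap (fun r => r)).foldl min v0 = mval ((v0 :: r0) :: rest) v0 := by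
      have h1 : mval ((v0 :: r0) :: rest) v0 = mval rest ((v0 :: r0).foldl min v0) := rfl
      rw [h1, mval_eq_flat, List.foldl_append]
      simp [List.foldl]
    have hmle : (r0 ++ rest.flatMap (fun r => r)).foldl min v0 ≤ v0 := fmin_le_init _ _
    rcases lt_or_eq_of_le hmle with hlt | heq
    · obtain ⟨r, j, hres, hsearch⟩ :=
        fOuter_upd ((v0 :: r0) :: rest) 0 (v0, 0, 0) _ hmval hlt
      rw [hf, hfa, hres, hsearch]
    · -- the minimum equals arr[0][0]: A never updates; B finds it at (0,0)
      have hall : ∀ row ∈ (v0 :: r0) :: rest, ∀ v ∈ row, (v0 : Int) ≤ v := by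
        intro row hr v hv
        have : (r0 ++ rest.flatMap (fun r => r)).foldl min v0 ≤ v := by
          rw [hmval, mval_eq_flat]
          exact fmin_le_mem _ _ (List.mem_flatMap.mpr ⟨row, hr, hv⟩)
        omega
      rw [hf, hfa, fOuter_noupd _ 0 (v0, 0, 0) hall, heq]
      simp [fAltSearch, fAltRow]
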